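-- pv_equiv track=rewrite | github.com/julianrosen/mhs | file_io.py | is_Lyndon_word
-- ===== SOURCE A (Python) =====
-- def is_Lyndon_word(s):
--     k = 0
--     while k < len(s):
--         i,j = k,k+1
--         while j < len(s) and s[i] <= s[j]:
--             i = (s[i] == s[j]) and i+1 or k     # Python cond?yes:no syntax
--             j += 1
--         if k < i + 1 and j - i == len(s):
--             return True
--         return False
-- ===== SOURCE B (Python) =====
-- def is_Lyndon_word(s):
--     if not s:
--         return None  # A falls out of its while loop and returns None for ''
--     return all(s < s[i:] for i in range(1, len(s)))
-- ===== Notes on version B (the rewrite author's own statement) =====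
-- stated objective: simpler
-- what changed: Replaces A's single-pass Duval-style factorization scan (two moving indices with a conditional-expression update) by the two-line definitional check that a nonempty string is a Lyndon word iff it is lexicographically smaller than each of its proper suffixes (empty string still returns None, as A does).
import Mathlib
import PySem

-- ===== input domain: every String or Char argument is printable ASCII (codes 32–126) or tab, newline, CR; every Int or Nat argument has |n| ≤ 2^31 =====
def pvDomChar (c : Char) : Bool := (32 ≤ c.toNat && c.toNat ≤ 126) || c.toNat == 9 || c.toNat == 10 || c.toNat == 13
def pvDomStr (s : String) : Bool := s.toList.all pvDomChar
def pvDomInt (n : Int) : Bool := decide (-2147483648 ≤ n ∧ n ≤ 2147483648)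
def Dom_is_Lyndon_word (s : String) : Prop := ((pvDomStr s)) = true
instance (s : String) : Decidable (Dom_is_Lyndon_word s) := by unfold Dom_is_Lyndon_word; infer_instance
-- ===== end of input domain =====

-- B replaces A's single-pass Duval-style scan by the quadratic definitional check
-- "s is smaller than every proper suffix" (objective: simpler; not faster).

-- ===== PORT A =====
-- A's inner while loop (k is always 0 when it runs).  Indices i, j are only read when
-- 0 ≤ i < j < len(s), so `getD _ default` is exact for Python's s[i], s[j].
-- Python's `(s[i] == s[j]) and i+1 or k` is a cond-expression: i+1 ≥ 1 is always truthy.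
def pvALoop (cs : List Char) (i j : Nat) : Nat × Nat :=
  if _h : j < cs.length then
    if cs.getD i default ≤ cs.getD j default then
      pvALoop cs (if cs.getD i default = cs.getD j default then i + 1 else 0) (j + 1)
    else (i, j)
  else (i, j)
termination_by cs.length - j
decreasing_by omega

-- A's outer `while k < len(s)` runs its body at most once (the body always returns),
-- with k = 0; an empty string skips it and the function returns None.
def is_Lyndon_word (s : String) : Option Bool :=
  let cs := s.toList
  if 0 < cs.length then
    some (decide (0 < (pvALoop cs 0 1).1 + 1) &&
      decide ((pvALoop cs 0 1).2 - (pvALoop cs 0 1).1 = cs.length))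
  else none

-- ===== PORT B =====
-- Source B: `if not s: return None; return all(s < s[i:] for i in range(1, len(s)))`.
-- Python str `<` is Lean's `<` on toList (code-point lexicographic).
def is_Lyndon_word_alt (s : String) : Option Bool :=
  let cs := s.toList
  if cs.isEmpty then none
  else some ((PySem.List.pyRange 1 cs.length 1).all
      (fun i => decide (cs < PySem.List.slice cs (some i) none)))

-- ===== PRECONDITION & SPEC =====
def Spec_is_Lyndon_word (s : String) (out : Option Bool) : Prop := out = is_Lyndon_word_alt s
instance (s : String) (out : Option Bool) : Decidable (Spec_is_Lyndon_word s out) := by unfold Spec_is_Lyndon_word; infer_instance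

-- ===== CLAIM (what is proved, stated in full; the proofs are below) =====
def Claim_equal_is_Lyndon_word : Prop := ∀ (s : String), Dom_is_Lyndon_word s → Spec_is_Lyndon_word s (is_Lyndon_word s)

-- ===== LEMMAS AND PROOFS =====

-- character m of cs (out-of-range reads never occur where this matters)
def gC (cs : List Char) (m : Nat) : Char := cs.getD m default

-- "the suffix window starting at k is strictly greater than the prefix window, decided before j"
def GtW (cs : List Char) (k j : Nat) : Prop :=
  ∃ d, k + d < j ∧ (∀ e, e < d → gC cs (k + e) = gC cs e) ∧ gC cs d < gC cs (k + d)

-- cs has period p on [0, j)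
def PerP (cs : List Char) (p j : Nat) : Prop :=
  ∀ m, p ≤ m → m < j → gC cs m = gC cs (m - p)

-- cs[0:p] is a Lyndon word, stated character-wise
def LynW (cs : List Char) (p : Nat) : Prop := ∀ k, 1 ≤ k → k < p → GtW cs k p

lemma mod_period (cs : List Char) (p j : Nat) (hp : 1 ≤ p) (hper : PerP cs p j) :
    ∀ m, m < j → gC cs m = gC cs (m % p) := by
  intro m
  induction m using Nat.strong_induction_on with
  | _ m ih =>
    intro hm
    by_cases h : m < p
    · rw [Nat.mod_eq_of_lt h]
    · have hpm : p ≤ m := le_of_not_gt h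
      rw [hper m hpm hm, ih (m - p) (by omega) (by omega), Nat.mod_eq_sub_mod hpm]

lemma lex_exists : ∀ (xs ys : List Char), ys.length < xs.length →
    (List.Lex (· < ·) xs ys ↔ ∃ d, d < ys.length ∧
      (∀ e, e < d → xs.getD e default = ys.getD e default) ∧
      xs.getD d default < ys.getD d default) := by
  intro xs
  induction xs with
  | nil => intro ys h; simp at h
  | cons x xs ih =>
    intro ys h
    cases ys with
    | nil =>
      constructor
      · intro hlex; cases hlex
      · rintro ⟨d, hd, -, -⟩; simp at hd
    | cons y ys' =>
      have hlen : ys'.length < xs.length := by simpa using Nat.lt_of_succ_lt_succ h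
      constructor
      · intro hlex
        cases hlex with
        | rel hr => exact ⟨0, by simp, by simp, by simpa using hr⟩
        | cons ht =>
          obtain ⟨d, hd, hag, hlt⟩ := (ih ys' hlen).mp ht
          exact ⟨d + 1, by simpa using hd,
            fun e he => by
              cases e with
              | zero => simp
              | succ e' => simpa using hag e' (by omega),
            by simpa using hlt⟩
      · rintro ⟨d, hd, hag, hlt⟩
        cases d with
        | zero => exact List.Lex.rel (by simpa using hlt)
        | succ d' =>
          have hxy : x = y := by simpa using hag 0 (by omega)
          subst hxy
          exact List.Lex.cons ((ih ys' hlen).mpr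
            ⟨d', by simpa using hd,
             fun e he => by simpa using hag (e + 1) (by omega),
             by simpa using hlt⟩)

lemma getD_drop (cs : List Char) (k e : Nat) :
    (cs.drop k).getD e default = cs.getD (k + e) default := by
  simp [List.getD_eq_getElem?_getD, List.getElem?_drop]

lemma lt_drop_iff (cs : List Char) (k : Nat) (h1 : 1 ≤ k) (h2 : k < cs.length) :
    (cs < cs.drop k) ↔ GtW cs k cs.length := by
  have hlen : (cs.drop k).length < cs.length := by
    rw [List.length_drop]; omega
  rw [show (cs < cs.drop k) ↔ List.Lex (· < ·) cs (cs.drop k) from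
    List.lt_iff_lex_lt cs (cs.drop k), lex_exists cs (cs.drop k) hlen]
  simp only [GtW, gC, getD_drop, List.length_drop]
  constructor
  · rintro ⟨d, hd, hag, hlt⟩
    exact ⟨d, by omega, fun e he => (hag e he).symm, hlt⟩
  · rintro ⟨d, hd, hag, hlt⟩
    exact ⟨d, by omega, fun e he => (hag e he).symm, hlt⟩

lemma reset_step (cs : List Char) (i j : Nat) (hij : i < j)
    (hlyn : LynW cs (j - i)) (hper : PerP cs (j - i) j) (hlt : gC cs i < gC cs j) :
    LynW cs (j + 1) := by
  intro k hk1 hk2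
  have hp1 : 1 ≤ j - i := by omega
  have hmod := mod_period cs (j - i) j hp1 hper
  have hkj : k ≤ j := by omega
  by_cases hdvd : (j - i) ∣ k
  · obtain ⟨a, ha⟩ := hdvd
    refine ⟨j - k, by omega, ?_, ?_⟩
    · intro e he
      have h3 : (k + e) % (j - i) = e % (j - i) := by
        rw [ha, Nat.mul_add_mod]
      rw [hmod (k + e) (by omega), hmod e (by omega), h3]
    · have e1 : gC cs (j - k) = gC cs ((j - k) % (j - i)) := hmod _ (by omega)
      have e2 : gC cs (j - (j - i)) = gC cs ((j - (j - i)) % (j - i)) := hmod _ (by omega)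
      have e3 : (j - k) % (j - i) = j % (j - i) := by
        rw [ha]; exact Nat.sub_mul_mod (by omega)
      have e4 : (j - (j - i)) % (j - i) = j % (j - i) := by
        have := Nat.sub_mul_mod (x := j) (n := j - i) (k := 1) (by omega)
        simpa using this
      have hji : j - (j - i) = i := by omega
      have hkey : gC cs (j - k) = gC cs i := by
        rw [e1, e3, ← e4, ← e2, hji]
      rw [show k + (j - k) = j from by omega, hkey]
      exact hlt
  · have hq := Nat.div_add_mod k (j - i)
    have hr1 : 1 ≤ k % (j - i) := by
      rcases Nat.eq_zero_or_pos (k % (j - i)) with h0 | h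
      · exact absurd (Nat.dvd_of_mod_eq_zero h0) hdvd
      · exact h
    have hrp : k % (j - i) < j - i := Nat.mod_lt _ (by omega)
    obtain ⟨d0, hd0, ag0, lt0⟩ := hlyn (k % (j - i)) hr1 hrp
    have key : ∀ e, e ≤ d0 → k + e < j → gC cs (k + e) = gC cs (k % (j - i) + e) := by
      intro e he hlt'
      have h2 : (k + e) % (j - i) = (k % (j - i) + e) % (j - i) := by
        conv_lhs => rw [← hq]
        rw [Nat.add_assoc, Nat.mul_add_mod]
      rw [hmod (k + e) hlt', h2, Nat.mod_eq_of_lt (by omega)]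
    by_cases hcase : k + d0 < j
    · refine ⟨d0, by omega, ?_, ?_⟩
      · intro e he
        rw [key e (by omega) (by omega), ag0 e he]
      · rw [key d0 le_rfl hcase]
        exact lt0
    · have hestar : j - k ≤ d0 := by omega
      refine ⟨j - k, by omega, ?_, ?_⟩
      · intro e he
        rw [key e (by omega) (by omega), ag0 e (by omega)]
      · rw [show k + (j - k) = j from by omega]
        have e2 : gC cs (j - (j - i)) = gC cs ((j - (j - i)) % (j - i)) := hmod _ (by omega)
        have e4 : (j - (j - i)) % (j - i) = j % (j - i) := by
          have := Nat.sub_mul_mod (x := j) (n := j - i) (k := 1) (by omega)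
          simpa using this
        have e5 : j % (j - i) = k % (j - i) + (j - k) := by
          have h7 := Nat.add_mod k (j - k) (j - i)
          rw [show k + (j - k) = j from by omega] at h7
          rw [h7, Nat.mod_eq_of_lt (show j - k < j - i from by omega),
            Nat.mod_eq_of_lt (show k % (j - i) + (j - k) < j - i from by omega)]
        have hgi : gC cs i = gC cs (k % (j - i) + (j - k)) := by
          have h8 : gC cs (j - (j - i)) = gC cs (k % (j - i) + (j - k)) := by
            rw [e2, e4, e5]
          rwa [show j - (j - i) = i from by omega] at h8
        rcases lt_or_eq_of_le hestar with hlt2 | heq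
        · calc gC cs (j - k) = gC cs (k % (j - i) + (j - k)) := (ag0 (j - k) hlt2).symm
            _ = gC cs i := hgi.symm
            _ < gC cs j := hlt
        · calc gC cs (j - k) = gC cs d0 := by rw [heq]
            _ < gC cs (k % (j - i) + d0) := lt0
            _ = gC cs (k % (j - i) + (j - k)) := by rw [heq]
            _ = gC cs i := hgi.symm
            _ < gC cs j := hlt

lemma exit_len (cs : List Char) (i j : Nat) (hij : i < j) (hj : j = cs.length)
    (hlyn : LynW cs (j - i)) (hper : PerP cs (j - i) j) :
    (j - i = cs.length ↔ ∀ k, 1 ≤ k → k < cs.length → GtW cs k cs.length) := by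
  by_cases hi : i = 0
  · subst hi
    refine iff_of_true (by omega) ?_
    intro k h1 h2
    have := hlyn k h1 (by omega)
    rwa [show j - 0 = cs.length from by omega] at this
  · refine iff_of_false (by omega) ?_
    intro hall
    obtain ⟨d, hd, hag, hlt⟩ := hall (j - i) (by omega) (by omega)
    have hper' := hper ((j - i) + d) (by omega) (by omega)
    rw [show (j - i) + d - (j - i) = d from by omega] at hper'
    rw [hper'] at hlt
    exact lt_irrefl _ hlt

lemma exit_fail (cs : List Char) (i j : Nat) (hij : i < j) (hjlen : j < cs.length)
    (hper : PerP cs (j - i) j) (hgt : gC cs j < gC cs i) :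
    (j - i = cs.length ↔ ∀ k, 1 ≤ k → k < cs.length → GtW cs k cs.length) := by
  refine iff_of_false (by omega) ?_
  intro hall
  obtain ⟨d, hd, hag, hlt⟩ := hall (j - i) (by omega) (by omega)
  rcases lt_trichotomy d i with hdi | hdi | hdi
  · have hper' := hper ((j - i) + d) (by omega) (by omega)
    rw [show (j - i) + d - (j - i) = d from by omega] at hper'
    rw [hper'] at hlt
    exact lt_irrefl _ hlt
  · rw [hdi] at hlt
    rw [show (j - i) + i = j from by omega] at hlt
    exact lt_irrefl _ (lt_trans hlt hgt)
  · have := hag i hdi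
    rw [show (j - i) + i = j from by omega] at this
    rw [this] at hgt
    exact lt_irrefl _ hgt

lemma pvALoop_main (cs : List Char) : ∀ fuel i j, cs.length - j ≤ fuel → i < j →
    j ≤ cs.length → LynW cs (j - i) → PerP cs (j - i) j →
    (((pvALoop cs i j).2 - (pvALoop cs i j).1 = cs.length) ↔
      ∀ k, 1 ≤ k → k < cs.length → GtW cs k cs.length) := by
  intro fuel
  induction fuel with
  | zero =>
    intro i j hfuel hij hjlen hlyn hper
    have hj : j = cs.length := by omega
    rw [pvALoop, dif_neg (by omega)]
    exact exit_len cs i j hij hj hlyn hper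
  | succ fuel ih =>
    intro i j hfuel hij hjlen hlyn hper
    by_cases hjl : j < cs.length
    · rw [pvALoop, dif_pos hjl]
      by_cases hle : cs.getD i default ≤ cs.getD j default
      · rw [if_pos hle]
        by_cases heq : cs.getD i default = cs.getD j default
        · rw [if_pos heq]
          have h1 : LynW cs (j + 1 - (i + 1)) := by
            rw [show j + 1 - (i + 1) = j - i from by omega]; exact hlyn
          have h2 : PerP cs (j + 1 - (i + 1)) (j + 1) := by
            rw [show j + 1 - (i + 1) = j - i from by omega]
            intro m hm1 hm2
            rcases Nat.lt_or_ge m j with hmj | hmj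
            · exact hper m hm1 hmj
            · have hmj' : m = j := by omega
              rw [hmj', show j - (j - i) = i from by omega]
              exact heq.symm
          exact ih (i + 1) (j + 1) (by omega) (by omega) (by omega) h1 h2
        · rw [if_neg heq]
          have hlt : gC cs i < gC cs j := lt_of_le_of_ne hle heq
          have h1 : LynW cs (j + 1 - 0) := by
            rw [show j + 1 - 0 = j + 1 from by omega]
            exact reset_step cs i j hij hlyn hper hlt
          have h2 : PerP cs (j + 1 - 0) (j + 1) := by
            intro m hm1 hm2; omega
          exact ih 0 (j + 1) (by omega) (by omega) (by omega) h1 h2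
      · rw [if_neg hle]
        exact exit_fail cs i j hij hjl hper (lt_of_not_ge hle)
    · have hj : j = cs.length := by omega
      rw [pvALoop, dif_neg (by omega)]
      exact exit_len cs i j hij hj hlyn hper

-- ===== VERDICT (by name: the statement is the Claim_ definition above) =====
theorem is_Lyndon_word_spec : Claim_equal_is_Lyndon_word := by
  intro s _
  unfold Spec_is_Lyndon_word is_Lyndon_word is_Lyndon_word_alt
  by_cases hnil : s.toList.isEmpty
  · have h0 : s.toList.length = 0 := by simpa using hnil
    simp [hnil, h0]
  · have hpos : 0 < s.toList.length :=
      List.length_pos_of_ne_nil (by simpa [List.isEmpty_iff] using hnil)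
    rw [if_pos hpos, if_neg (by simpa using hnil)]
    have hmain := pvALoop_main (s.toList) (s.toList.length) 0 1 (by omega) (by omega) hpos
      (by intro k h1 h2; exact absurd h2 (by omega))
      (by intro m h1 h2; exact absurd h2 (by omega))
    congr 1
    rw [Bool.eq_iff_iff]
    simp only [Bool.and_eq_true, decide_eq_true_eq, List.all_eq_true]
    constructor
    · rintro ⟨-, hA⟩
      intro x hx
      rw [PySem.List.mem_pyRange_one] at hx
      rw [PySem.List.slice_from s.toList (by omega)]
      exact (lt_drop_iff (s.toList) x.toNat (by omega) (by omega)).mpr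
        (hmain.mp hA x.toNat (by omega) (by omega))
    · intro hall
      refine ⟨by omega, ?_⟩
      rw [hmain]
      intro k h1 h2
      have hx := hall (k : Int) (by rw [PySem.List.mem_pyRange_one]; omega)
      rw [PySem.List.slice_from s.toList (by omega), Int.toNat_natCast] at hx
      exact (lt_drop_iff (s.toList) k h1 h2).mp hx
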